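-- pv_equiv track=rewrite | github.com/AdrianSuliga/WDI | 06_Recursion/ex_19.py | BLKing
-- ===== SOURCE A (Python) =====
-- def BLKing(w, k, T):
--     n = len(T)
--     if w == n - 1 and k == 0: return True
--     if w >= n or k >= n: return False
--
--     k1, k2, k3 = False, False, False
--     if -1 < w + 1 < n and -1 < k - 1 < n and canMove(T[w][k], T[w + 1][k - 1]):
--         k1 = BLKing(w + 1, k - 1, T)
--     if -1 < w + 1 < n and -1 < k < n and canMove(T[w][k], T[w+1][k]):
--         k2 = BLKing(w + 1, k, T)
--     if -1 < w < n and -1 < k - 1 < n and canMove(T[w][k], T[w][k - 1]):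
--         k3 = BLKing(w, k - 1, T)
--     return k1 or k2 or k3
--
-- def canMove(n1, n2):
--     x1, x2 = n1 % 10, 0
--     while n2 != 0:
--         x2 = n2 % 10
--         n2 //= 10
--     if x1 < x2: return True
--     return False
-- ===== SOURCE B (Python) =====
-- def _can(a, b):
--     # move allowed iff last digit of a < first digit of b (b assumed >= 0)
--     while b >= 10:
--         b //= 10
--     return a % 10 < b
--
-- def BLKing(w, k, T):
--     n = len(T)
--     if w == n - 1 and k == 0:
--         return True
--     if w >= n or k >= n:
--         return False
--     below = []  # reachability row for i+1 (empty above the last row)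
--     for i in range(n - 1, -1, -1):
--         cur = []
--         for j in range(n):
--             if i == n - 1 and j == 0:
--                 cur.append(True)
--                 continue
--             r = False
--             if below and j >= 1 and _can(T[i][j], T[i + 1][j - 1]) and below[j - 1]:
--                 r = True
--             if below and _can(T[i][j], T[i + 1][j]) and below[j]:
--                 r = True
--             if j >= 1 and _can(T[i][j], T[i][j - 1]) and cur[j - 1]:
--                 r = True
--             cur.append(r)
--         if i == w:
--             return cur[k]
--         below = cur
--     return False
-- ===== Notes on version B (the rewrite author's own statement) =====
-- stated objective: alternative
-- what changed: replaces the three-way recursion over (w,k) with a bottom-up dynamic program that fills one reachability row per grid row (each cell computed once from the row below and the current row prefix), and computes the leading digit by a direct divide-down loop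
-- outside the precondition, e.g. on BLKing(-1, -1, [[], [0]]): A returns False, B raises IndexError; on BLKing(-1, 0, [[1]]): A returns False, B returns False; on BLKing(1, 1, [[1], [2, 3]]): A returns False, B returns False
import Mathlib
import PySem

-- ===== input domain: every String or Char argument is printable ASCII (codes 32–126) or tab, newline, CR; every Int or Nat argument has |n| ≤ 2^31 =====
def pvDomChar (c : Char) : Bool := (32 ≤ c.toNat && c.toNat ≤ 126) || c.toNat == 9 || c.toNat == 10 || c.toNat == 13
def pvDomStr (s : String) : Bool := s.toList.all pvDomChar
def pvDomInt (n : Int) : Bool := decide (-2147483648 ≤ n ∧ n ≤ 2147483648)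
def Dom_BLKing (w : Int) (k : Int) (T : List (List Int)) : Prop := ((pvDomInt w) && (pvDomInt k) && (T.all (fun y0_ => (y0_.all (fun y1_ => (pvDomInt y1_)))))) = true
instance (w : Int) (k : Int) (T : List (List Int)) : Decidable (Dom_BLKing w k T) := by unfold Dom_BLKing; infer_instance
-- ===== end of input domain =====

-- B replaces A's three-way recursion over (w,k) by a bottom-up DP filling one
-- reachability row per grid row (each cell computed once); objective: alternative.


-- ===== PORT A =====
-- T[i][j]; pyGetD's defaults only fire on IndexError inputs, which Pre_BLKing excludes
def pvCell (T : List (List Int)) (i j : Int) : Int :=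
  PySem.List.pyGetD (PySem.List.pyGetD T i []) j 0

-- the while-loop of canMove; fuel n2.natAbs+1 is enough for n2 ≥ 0 (for n2 < 0 the
-- Python loop diverges; Pre_BLKing excludes grids with negative entries)
def canMoveAux : Int → Int → Nat → Int
  | _, x2, 0 => x2
  | n2, x2, Nat.succ f =>
      if n2 ≠ 0 then canMoveAux (PySem.Int.floordiv n2 10) (PySem.Int.mod n2 10) f else x2

def canMove (n1 n2 : Int) : Bool :=
  let x1 := PySem.Int.mod n1 10
  let x2 := canMoveAux n2 0 (n2.natAbs + 1)
  decide (x1 < x2)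

def BLKing (w : Int) (k : Int) (T : List (List Int)) : Bool :=
  let n : Int := T.length
  if w = n - 1 ∧ k = 0 then true
  else if w ≥ n ∨ k ≥ n then false
  else
    let k1 := if h1 : -1 < w + 1 ∧ w + 1 < n ∧ -1 < k - 1 ∧ k - 1 < n ∧
                      canMove (pvCell T w k) (pvCell T (w + 1) (k - 1)) = true
              then BLKing (w + 1) (k - 1) T else false
    let k2 := if h2 : -1 < w + 1 ∧ w + 1 < n ∧ -1 < k ∧ k < n ∧
                      canMove (pvCell T w k) (pvCell T (w + 1) k) = true
              then BLKing (w + 1) k T else false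
    let k3 := if h3 : -1 < w ∧ w < n ∧ -1 < k - 1 ∧ k - 1 < n ∧
                      canMove (pvCell T w k) (pvCell T w (k - 1)) = true
              then BLKing w (k - 1) T else false
    k1 || k2 || k3
termination_by (((T.length : Int) - w).toNat + k.toNat)
decreasing_by all_goals omega

-- ===== PORT B =====
-- the while-loop of _can; same fuel convention as canMoveAux
def canAltAux : Int → Nat → Int
  | b, 0 => b
  | b, Nat.succ f => if b ≥ 10 then canAltAux (PySem.Int.floordiv b 10) f else b

def canAlt (a b : Int) : Bool :=
  decide (PySem.Int.mod a 10 < canAltAux b (b.natAbs + 1))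

-- body of the inner 'for j in range(n)' loop of Source B
def altStep (T : List (List Int)) (n i : Int) (below cur : List Bool) (j : Int) : List Bool :=
  if i = n - 1 ∧ j = 0 then cur ++ [true]
  else
    let r : Bool := false
    let r := if below ≠ [] ∧ 1 ≤ j ∧ canAlt (pvCell T i j) (pvCell T (i + 1) (j - 1)) = true ∧
                PySem.List.pyGetD below (j - 1) false = true then true else r
    let r := if below ≠ [] ∧ canAlt (pvCell T i j) (pvCell T (i + 1) j) = true ∧
                PySem.List.pyGetD below j false = true then true else r
    let r := if 1 ≤ j ∧ canAlt (pvCell T i j) (pvCell T i (j - 1)) = true ∧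
                PySem.List.pyGetD cur (j - 1) false = true then true else r
    cur ++ [r]

def altRow (T : List (List Int)) (n i : Int) (below : List Bool) : List Bool :=
  (PySem.List.pyRange 0 n 1).foldl (altStep T n i below) []

-- the outer 'for i in range(n-1, -1, -1)' loop, with the early 'return cur[k]'
def altLoop (T : List (List Int)) (n w k : Int) (below : List Bool) : List Int → Bool
  | [] => false
  | i :: rest =>
      let cur := altRow T n i below
      if i = w then PySem.List.pyGetD cur k false
      else altLoop T n w k cur rest

def BLKing_alt (w : Int) (k : Int) (T : List (List Int)) : Bool :=
  let n : Int := T.length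
  if w = n - 1 ∧ k = 0 then true
  else if w ≥ n ∨ k ≥ n then false
  else altLoop T n w k [] (PySem.List.pyRange (n - 1) (-1) (-1))

-- ===== PRECONDITION & SPEC =====
-- Unless A answers immediately (target start, or w/k already past the grid, where
-- no cell is read), Pre_ excludes: negative w or k (A then reads cells through
-- accidental negative-index wraparound), ragged grids (A generally raises
-- IndexError there, though it returns on a few), and grids with a negative entry
-- (canMove's while loop diverges on negative numbers).
def Pre_BLKing (w : Int) (k : Int) (T : List (List Int)) : Prop :=
  (w = (T.length : Int) - 1 ∧ k = 0) ∨
  (w ≥ (T.length : Int) ∨ k ≥ (T.length : Int)) ∨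
  (0 ≤ w ∧ 0 ≤ k ∧ ∀ row ∈ T, row.length = T.length ∧ ∀ e ∈ row, 0 ≤ e)
instance (w : Int) (k : Int) (T : List (List Int)) : Decidable (Pre_BLKing w k T) := by
  unfold Pre_BLKing; infer_instance

def pvWitness_BLKing : Int × Int × List (List Int) := (0, 1, [[1, 5], [9, 2]])

def Spec_BLKing (w : Int) (k : Int) (T : List (List Int)) (out : Bool) : Prop := out = BLKing_alt w k T
instance (w : Int) (k : Int) (T : List (List Int)) (out : Bool) : Decidable (Spec_BLKing w k T out) := by
  unfold Spec_BLKing; infer_instance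

-- ===== CLAIM (what is proved, stated in full; the proofs are below) =====
def Claim_equal_BLKing : Prop := ∀ (w : Int) (k : Int) (T : List (List Int)),
  Dom_BLKing w k T → Pre_BLKing w k T → Spec_BLKing w k T (BLKing w k T)

-- ===== LEMMAS AND PROOFS =====

theorem BLKing_base (T : List (List Int)) : BLKing ((T.length : Int) - 1) 0 T = true := by
  unfold BLKing
  rw [if_pos ⟨rfl, rfl⟩]

theorem BLKing_true_iff (T : List (List Int)) (i j : Int)
    (hi : 0 ≤ i) (hin : i < (T.length : Int)) (hj : 0 ≤ j) (hjn : j < (T.length : Int))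
    (hbase : ¬(i = (T.length : Int) - 1 ∧ j = 0)) :
    (BLKing i j T = true ↔
      ((i + 1 < (T.length : Int) ∧ 1 ≤ j ∧ canMove (pvCell T i j) (pvCell T (i+1) (j-1)) = true ∧ BLKing (i+1) (j-1) T = true) ∨
       (i + 1 < (T.length : Int) ∧ canMove (pvCell T i j) (pvCell T (i+1) j) = true ∧ BLKing (i+1) j T = true) ∨
       (1 ≤ j ∧ canMove (pvCell T i j) (pvCell T i (j-1)) = true ∧ BLKing i (j-1) T = true))) := by
  conv_lhs => rw [BLKing.eq_def]
  rw [if_neg hbase, if_neg (by omega : ¬((i : Int) ≥ (T.length : Int) ∨ j ≥ (T.length : Int)))]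
  simp only [dite_eq_ite]
  have e1 : (-1 < i + 1 ∧ i + 1 < (T.length : Int) ∧ -1 < j - 1 ∧ j - 1 < (T.length : Int) ∧
      canMove (pvCell T i j) (pvCell T (i + 1) (j - 1)) = true) ↔
      (i + 1 < (T.length : Int) ∧ 1 ≤ j ∧ canMove (pvCell T i j) (pvCell T (i+1) (j-1)) = true) := by
    constructor
    · rintro ⟨_, h, hk, _, hc⟩; exact ⟨h, by omega, hc⟩
    · rintro ⟨h, hk, hc⟩; exact ⟨by omega, h, by omega, by omega, hc⟩
  have e2 : (-1 < i + 1 ∧ i + 1 < (T.length : Int) ∧ -1 < j ∧ j < (T.length : Int) ∧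
      canMove (pvCell T i j) (pvCell T (i + 1) j) = true) ↔
      (i + 1 < (T.length : Int) ∧ canMove (pvCell T i j) (pvCell T (i+1) j) = true) := by
    constructor
    · rintro ⟨_, h, _, _, hc⟩; exact ⟨h, hc⟩
    · rintro ⟨h, hc⟩; exact ⟨by omega, h, by omega, by omega, hc⟩
  have e3 : (-1 < i ∧ i < (T.length : Int) ∧ -1 < j - 1 ∧ j - 1 < (T.length : Int) ∧
      canMove (pvCell T i j) (pvCell T i (j - 1)) = true) ↔
      (1 ≤ j ∧ canMove (pvCell T i j) (pvCell T i (j-1)) = true) := by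
    constructor
    · rintro ⟨_, _, hk, _, hc⟩; exact ⟨by omega, hc⟩
    · rintro ⟨hk, hc⟩; exact ⟨by omega, by omega, by omega, by omega, hc⟩
  simp only [e1, e2, e3]
  have key : ∀ (c : Prop) [Decidable c] (b : Bool), ((if c then b else false) = true ↔ c ∧ b = true) := by
    intro c _ b; split_ifs with h <;> simp [h]
  simp only [Bool.or_eq_true, key, and_assoc]
  rw [or_assoc]

theorem canMoveAux_zero : ∀ (f : Nat) (x2 : Int), canMoveAux 0 x2 f = x2 := by
  intro f x2; cases f <;> simp [canMoveAux]

theorem canAux_eq : ∀ (f : Nat) (b x2 : Int), 0 < b → b.natAbs < f →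
    canMoveAux b x2 f = canAltAux b f := by
  intro f
  induction f with
  | zero => intro b x2 hb hf; omega
  | succ f ih =>
    intro b x2 hb hf
    have hd : PySem.Int.floordiv b 10 = b / 10 := PySem.Int.floordiv_eq_ediv_of_pos (by omega)
    have hm : PySem.Int.mod b 10 = b % 10 := PySem.Int.mod_eq_emod_of_pos (by omega)
    rw [canMoveAux, if_pos (by omega : b ≠ 0), hd, hm]
    by_cases h10 : b ≥ 10
    · rw [canAltAux, if_pos h10, hd]
      exact ih (b / 10) (b % 10) (by omega) (by omega)
    · have : b / 10 = 0 := by omega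
      rw [this, canMoveAux_zero, canAltAux, if_neg h10]
      omega

theorem canEq (a b : Int) (hb : 0 ≤ b) : canMove a b = canAlt a b := by
  rcases eq_or_lt_of_le hb with h | h
  · subst h; rfl
  · simp only [canMove, canAlt]
    rw [canAux_eq (b.natAbs + 1) b 0 h (by omega)]

theorem cell_nonneg (T : List (List Int)) (hsq : ∀ row ∈ T, row.length = T.length ∧ ∀ e ∈ row, 0 ≤ e)
    (i j : Int) : 0 ≤ pvCell T i j := by
  unfold pvCell
  by_cases hi : PySem.Raise.InRange T.length i
  · have hrow : PySem.List.pyGetD T i [] ∈ T := PySem.List.pyGetD_mem T [] hi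
    by_cases hj : PySem.Raise.InRange (PySem.List.pyGetD T i []).length j
    · exact (hsq _ hrow).2 _ (PySem.List.pyGetD_mem _ 0 hj)
    · rw [PySem.List.pyGetD_of_none _ j 0 ((PySem.List.pyGet?_eq_none_iff _ j).2 hj)]
  · rw [PySem.List.pyGetD_of_none T i [] ((PySem.List.pyGet?_eq_none_iff T i).2 hi)]
    rw [PySem.List.pyGetD_of_none ([] : List Int) j 0 (by
      rw [PySem.List.pyGet?_eq_none_iff]
      simp [PySem.Raise.InRange])]


def rowA (T : List (List Int)) (i : Int) : List Bool :=
  (List.range T.length).map (fun j : Nat => BLKing i (j : Int) T)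

theorem chainkey (a b c : Prop) [Decidable a] [Decidable b] [Decidable c] :
    ((if c then true else if b then true else if a then true else false) = true ↔ (a ∨ b ∨ c)) := by
  split_ifs <;> simp_all

theorem altStep_eq (T : List (List Int))
    (hsq : ∀ row ∈ T, row.length = T.length ∧ ∀ e ∈ row, 0 ≤ e)
    (i : Int) (hi : 0 ≤ i) (hin : i < (T.length : Int))
    (below : List Bool) (hb : below = if i = (T.length : Int) - 1 then [] else rowA T (i + 1))
    (m : Nat) (hm : m < T.length) :
    altStep T (T.length : Int) i below ((List.range m).map (fun j : Nat => BLKing i (j : Int) T)) (m : Int)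
      = (List.range m).map (fun j : Nat => BLKing i (j : Int) T) ++ [BLKing i (m : Int) T] := by
  have hne : (below ≠ []) ↔ i + 1 < (T.length : Int) := by
    by_cases hlast : i = (T.length : Int) - 1
    · rw [hb, if_pos hlast]; simp; omega
    · rw [hb, if_neg hlast]
      have : (rowA T (i + 1)).length = T.length := by simp [rowA]
      constructor
      · intro _; omega
      · intro _ hnil; rw [hnil] at this; simp at this; omega
  have hbelow : i + 1 < (T.length : Int) → below = rowA T (i + 1) := by
    intro h; rw [hb, if_neg (by omega)]
  simp only [altStep]
  by_cases h : i = (T.length : Int) - 1 ∧ (m : Int) = 0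
  · rw [if_pos h]
    have : BLKing i (m : Int) T = true := by
      rw [h.1, h.2]; exact BLKing_base T
    rw [this]
  · rw [if_neg h]
    have E1 : (below ≠ [] ∧ 1 ≤ (m : Int) ∧ canAlt (pvCell T i m) (pvCell T (i + 1) ((m : Int) - 1)) = true ∧
        PySem.List.pyGetD below ((m : Int) - 1) false = true) ↔
        (i + 1 < (T.length : Int) ∧ 1 ≤ (m : Int) ∧ canMove (pvCell T i m) (pvCell T (i + 1) ((m : Int) - 1)) = true ∧
          BLKing (i + 1) ((m : Int) - 1) T = true) := by
      have hcan := canEq (pvCell T i m) (pvCell T (i + 1) ((m : Int) - 1)) (cell_nonneg T hsq _ _)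
      constructor
      · rintro ⟨h1, h2, h3, h4⟩
        have hb' := hbelow (hne.1 h1)
        have hcast : ((m : Int) - 1) = ((m - 1 : Nat) : Int) := by omega
        rw [hb', hcast, PySem.List.pyGetD_natCast, rowA,
            PySem.List.getD_map_range _ _ _ _ (by omega)] at h4
        rw [← hcast] at h4
        exact ⟨hne.1 h1, h2, by rw [hcan]; exact h3, h4⟩
      · rintro ⟨h1, h2, h3, h4⟩
        refine ⟨hne.2 h1, h2, by rw [← hcan]; exact h3, ?_⟩
        have hb' := hbelow h1
        have hcast : ((m : Int) - 1) = ((m - 1 : Nat) : Int) := by omega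
        rw [hb', hcast, PySem.List.pyGetD_natCast, rowA,
            PySem.List.getD_map_range _ _ _ _ (by omega)]
        rw [hcast] at h4; exact h4
    have E2 : (below ≠ [] ∧ canAlt (pvCell T i m) (pvCell T (i + 1) (m : Int)) = true ∧
        PySem.List.pyGetD below (m : Int) false = true) ↔
        (i + 1 < (T.length : Int) ∧ canMove (pvCell T i m) (pvCell T (i + 1) (m : Int)) = true ∧
          BLKing (i + 1) (m : Int) T = true) := by
      have hcan := canEq (pvCell T i m) (pvCell T (i + 1) (m : Int)) (cell_nonneg T hsq _ _)
      constructor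
      · rintro ⟨h1, h3, h4⟩
        rw [hbelow (hne.1 h1), PySem.List.pyGetD_natCast, rowA,
            PySem.List.getD_map_range _ _ _ _ hm] at h4
        exact ⟨hne.1 h1, by rw [hcan]; exact h3, h4⟩
      · rintro ⟨h1, h3, h4⟩
        refine ⟨hne.2 h1, by rw [← hcan]; exact h3, ?_⟩
        rw [hbelow h1, PySem.List.pyGetD_natCast, rowA,
            PySem.List.getD_map_range _ _ _ _ hm]
        exact h4
    have E3 : (1 ≤ (m : Int) ∧ canAlt (pvCell T i m) (pvCell T i ((m : Int) - 1)) = true ∧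
        PySem.List.pyGetD ((List.range m).map (fun j : Nat => BLKing i (j : Int) T)) ((m : Int) - 1) false = true) ↔
        (1 ≤ (m : Int) ∧ canMove (pvCell T i m) (pvCell T i ((m : Int) - 1)) = true ∧
          BLKing i ((m : Int) - 1) T = true) := by
      have hcan := canEq (pvCell T i m) (pvCell T i ((m : Int) - 1)) (cell_nonneg T hsq _ _)
      constructor
      · rintro ⟨h2, h3, h4⟩
        have hcast : ((m : Int) - 1) = ((m - 1 : Nat) : Int) := by omega
        rw [hcast, PySem.List.pyGetD_natCast,
            PySem.List.getD_map_range _ _ _ _ (by omega)] at h4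
        rw [← hcast] at h4
        exact ⟨h2, by rw [hcan]; exact h3, h4⟩
      · rintro ⟨h2, h3, h4⟩
        refine ⟨h2, by rw [← hcan]; exact h3, ?_⟩
        have hcast : ((m : Int) - 1) = ((m - 1 : Nat) : Int) := by omega
        rw [hcast, PySem.List.pyGetD_natCast,
            PySem.List.getD_map_range _ _ _ _ (by omega)]
        rw [hcast] at h4; exact h4
    simp only [E1, E2, E3]
    congr 1
    have hiff := BLKing_true_iff T i (m : Int) hi hin (by omega) (by exact_mod_cast hm) h
    rw [List.cons.injEq]
    refine ⟨?_, rfl⟩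
    rw [Bool.eq_iff_iff, chainkey, hiff]

theorem altRow_prefix (T : List (List Int))
    (hsq : ∀ row ∈ T, row.length = T.length ∧ ∀ e ∈ row, 0 ≤ e)
    (i : Int) (hi : 0 ≤ i) (hin : i < (T.length : Int))
    (below : List Bool) (hb : below = if i = (T.length : Int) - 1 then [] else rowA T (i + 1)) :
    ∀ m : Nat, m ≤ T.length →
      ((List.range m).map (fun kk : Nat => (kk : Int))).foldl (altStep T (T.length : Int) i below) []
        = (List.range m).map (fun j : Nat => BLKing i (j : Int) T) := by
  intro m
  induction m with
  | zero => intro _; simp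
  | succ m ih =>
    intro hm
    rw [List.range_succ, List.map_append, List.map_append, List.foldl_append,
        ih (by omega)]
    simp only [List.map_cons, List.map_nil, List.foldl_cons, List.foldl_nil]
    exact altStep_eq T hsq i hi hin below hb m (by omega)

theorem altRow_eq (T : List (List Int))
    (hsq : ∀ row ∈ T, row.length = T.length ∧ ∀ e ∈ row, 0 ≤ e)
    (i : Int) (hi : 0 ≤ i) (hin : i < (T.length : Int))
    (below : List Bool) (hb : below = if i = (T.length : Int) - 1 then [] else rowA T (i + 1)) :
    altRow T (T.length : Int) i below = rowA T i := by
  rw [altRow, PySem.List.pyRange_one]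
  have h0 : (((T.length : Int)) - 0).toNat = T.length := by omega
  rw [h0]
  have hmap : (List.range T.length).map (fun k : Nat => (0 : Int) + (k : Int))
      = (List.range T.length).map (fun kk : Nat => (kk : Int)) := by
    simp
  rw [hmap, altRow_prefix T hsq i hi hin below hb T.length (le_refl _)]
  rfl

theorem altLoop_eq (T : List (List Int))
    (hsq : ∀ row ∈ T, row.length = T.length ∧ ∀ e ∈ row, 0 ≤ e)
    (w k : Int) (hw : 0 ≤ w) (hk : 0 ≤ k) (hkn : k < (T.length : Int)) :
    ∀ (c : Nat) (i : Int) (below : List Bool), (i - w).toNat = c → w ≤ i → i < (T.length : Int) →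
      below = (if i = (T.length : Int) - 1 then [] else rowA T (i + 1)) →
      altLoop T (T.length : Int) w k below (PySem.List.pyRange i (-1) (-1)) = BLKing w k T := by
  intro c
  induction c with
  | zero =>
    intro i below hc hwi hin hb
    have hiw : i = w := by omega
    rw [PySem.List.pyRange_neg_one_cons (by omega : (-1 : Int) < i)]
    simp only [altLoop]
    rw [if_pos hiw, altRow_eq T hsq i (by omega) hin below hb, hiw]
    have hkc : k = ((k.toNat : Nat) : Int) := by omega
    rw [hkc, PySem.List.pyGetD_natCast, rowA,
        PySem.List.getD_map_range _ _ _ _ (by omega : k.toNat < T.length)]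
  | succ c ih =>
    intro i below hc hwi hin hb
    have hiw : w < i := by omega
    rw [PySem.List.pyRange_neg_one_cons (by omega : (-1 : Int) < i)]
    simp only [altLoop]
    rw [if_neg (by omega : ¬ i = w), altRow_eq T hsq i (by omega) hin below hb]
    have : i - 1 + 1 = i := by omega
    have := ih (i - 1) (rowA T i) (by omega) (by omega) (by omega)
      (by rw [if_neg (by omega : ¬ i - 1 = (T.length : Int) - 1), this])
    exact this

-- ===== VERDICT (by name: the statement is the Claim_ definition above) =====
theorem BLKing_spec : Claim_equal_BLKing := by
  intro w k T _ hpre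
  unfold Spec_BLKing
  simp only [BLKing_alt]
  by_cases hc1 : w = (T.length : Int) - 1 ∧ k = 0
  · rw [if_pos hc1, hc1.1, hc1.2]
    exact BLKing_base T
  · rw [if_neg hc1]
    by_cases hc2 : w ≥ (T.length : Int) ∨ k ≥ (T.length : Int)
    · rw [if_pos hc2]
      conv_lhs => rw [BLKing.eq_def]
      rw [if_neg hc1, if_pos hc2]
    · rw [if_neg hc2]
      obtain ⟨hw, hk, hsq⟩ := (hpre.resolve_left hc1).resolve_left hc2
      exact (altLoop_eq T hsq w k hw hk (by omega) ((T.length : Int) - 1 - w).toNat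
        ((T.length : Int) - 1) [] rfl (by omega) (by omega) (by rw [if_pos rfl])).symm
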